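-- pv_equiv track=rewrite | github.com/amcumber/advent-of-code-2024 | aoc_2024/day11/soln.py | pop_stones
-- ===== SOURCE A (Python) =====
-- def pop_stones(stones):
--     out_stones = []
--     for n in range(10):
--         try:
--             while True:
--                 idx = stones.index(n)
--                 val = stones.pop(idx)
--                 out_stones.append(val)
--         except ValueError:
--             ...
--     return out_stones
-- ===== SOURCE B (Python) =====
-- # One counting pass instead of repeated index()/pop() scans.
-- # NOTE: A removes the extracted stones from its argument in place; B does not
-- # mutate its argument -- the equivalence claimed is about the return value only.
-- def pop_stones(stones):
--     counts = {}
--     for v in stones: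
--         if 0 <= v <= 9:
--             counts[v] = counts.get(v, 0) + 1
--     return [n for n in range(10) for _ in range(counts.get(n, 0))]
-- ===== Notes on version B (the rewrite author's own statement) =====
-- stated objective: faster
-- what changed: Replaces the ten nested index()/pop() scan loops with a single counting pass over the list (dict of counts) followed by emitting each value 0-9 count-many times; B does not mutate the argument (A pops the extracted stones in place).
import Mathlib
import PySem

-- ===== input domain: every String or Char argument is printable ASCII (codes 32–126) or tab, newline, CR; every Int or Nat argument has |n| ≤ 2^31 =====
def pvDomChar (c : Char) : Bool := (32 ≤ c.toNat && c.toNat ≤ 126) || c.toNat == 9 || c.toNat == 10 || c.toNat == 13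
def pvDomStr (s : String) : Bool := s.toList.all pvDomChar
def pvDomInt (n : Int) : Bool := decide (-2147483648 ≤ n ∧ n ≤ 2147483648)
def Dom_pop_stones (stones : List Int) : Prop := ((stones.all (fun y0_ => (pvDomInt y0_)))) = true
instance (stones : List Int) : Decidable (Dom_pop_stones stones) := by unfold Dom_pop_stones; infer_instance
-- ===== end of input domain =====

-- B replaces A's ten repeated index()/pop() scan loops by one counting pass; the
-- equivalence is about the RETURN value only (A pops the extracted 0–9 stones out
-- of its list argument in place, B leaves its argument untouched).

-- ===== PORT A =====
-- inner 'while True: idx = stones.index(n); val = stones.pop(idx); out_stones.append(val)'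
-- until stones.index raises ValueError (index? = none); pop? = none is unreachable
def popInner (n : Int) (stones out : List Int) : List Int × List Int :=
  match h1 : PySem.List.index? stones n with
  | none => (stones, out)
  | some idx =>
    match h2 : PySem.List.pop? stones (idx : Int) with
    | none => (stones, out)
    | some r => popInner n r.2 (out ++ [r.1])
termination_by stones.length
decreasing_by
  have := PySem.List.length_of_pop?_eq_some stones h2
  omega

def pop_stones (stones : List Int) : List Int :=
  ((PySem.List.pyRange 0 10 1).foldl (fun st n => popInner n st.1 st.2) (stones, ([] : List Int))).2

-- ===== PORT B =====
def pop_stones_alt (stones : List Int) : List Int :=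
  let counts := stones.foldl
    (fun (d : PySem.Dict Int Int) v => if 0 ≤ v ∧ v ≤ 9 then d.insert v (d.getD v 0 + 1) else d)
    PySem.Dict.empty
  (PySem.List.pyRange 0 10 1).flatMap (fun n => List.replicate (counts.getD n 0).toNat n)

-- ===== PRECONDITION & SPEC =====
def Spec_pop_stones (stones : List Int) (out : List Int) : Prop := out = pop_stones_alt stones
instance (stones : List Int) (out : List Int) : Decidable (Spec_pop_stones stones out) := by unfold Spec_pop_stones; infer_instance

-- ===== CLAIM (what is proved, stated in full; the proofs are below) =====
def Claim_equal_pop_stones : Prop := ∀ (stones : List Int), Dom_pop_stones stones → Spec_pop_stones stones (pop_stones stones)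

-- ===== LEMMAS AND PROOFS =====

-- the inner while-loop removes every occurrence of n and appends n count-many times
lemma popInner_eq (n : Int) (stones out : List Int) :
    popInner n stones out
      = (stones.filter (fun x => !(x == n)), out ++ List.replicate (stones.count n) n) := by
  fun_induction popInner n stones out with
  | case1 stones out h1 =>
    have hnot : n ∉ stones := (PySem.List.index?_eq_none_iff stones n).1 h1
    rw [List.filter_eq_self.2 (by intro a ha; simp; rintro rfl; exact hnot ha)]
    rw [List.count_eq_zero.2 hnot]
    simp
  | case2 stones out idx h1 h2 =>
    exfalso
    obtain ⟨pre, suf, hsp, hlen, hpre⟩ := (PySem.List.index?_eq_some_iff stones n idx).1 h1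
    have hlt : idx < stones.length := by
      subst hsp; simp [← hlen]
    rw [PySem.List.pop?_natCast stones idx hlt] at h2
    simp at h2
  | case3 stones out idx h1 r h2 ih =>
    obtain ⟨pre, suf, hsp, hlen, hpre⟩ := (PySem.List.index?_eq_some_iff stones n idx).1 h1
    have hlt : idx < stones.length := by
      subst hsp; simp [← hlen]
    rw [PySem.List.pop?_natCast stones idx hlt] at h2
    obtain ⟨hv, hrest⟩ : stones[idx] = n ∧ stones.eraseIdx idx = pre ++ suf := by
      subst hsp hlen
      constructor
      · simp [List.getElem_append_right (Nat.le_refl pre.length)]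
      · rw [List.eraseIdx_append_of_length_le (Nat.le_refl pre.length)]
        simp
    rw [hv, hrest] at h2
    have hr : r = (n, pre ++ suf) := (Option.some.inj h2).symm
    subst hr
    rw [ih, hsp]
    have hcpre : pre.count n = 0 := List.count_eq_zero.2 hpre
    rw [Prod.mk.injEq]
    constructor
    · simp
    · simp [List.count_append, hcpre, List.count_cons_self, List.replicate_succ]

-- folding the inner loop over a duplicate-free list of target values
lemma foldl_popInner (ns : List Int) (h : ns.Nodup) (s out : List Int) :
    ns.foldl (fun st n => popInner n st.1 st.2) (s, out)
      = (s.filter (fun x => !ns.contains x),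
         out ++ ns.flatMap (fun n => List.replicate (s.count n) n)) := by
  induction ns generalizing s out with
  | nil => simp
  | cons n rest ih =>
    have hnr : n ∉ rest := (List.nodup_cons.1 h).1
    have hrest : rest.Nodup := (List.nodup_cons.1 h).2
    rw [List.foldl_cons]
    have hstep : popInner n (s, out).1 (s, out).2
        = (s.filter (fun x => !(x == n)), out ++ List.replicate (s.count n) n) :=
      popInner_eq n s out
    rw [hstep, ih hrest]
    rw [Prod.mk.injEq]
    constructor
    · rw [List.filter_filter]
      apply List.filter_congr
      intro x _
      simp [beq_eq_decide, Bool.and_comm]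
    · rw [List.flatMap_cons, ← List.append_assoc]
      congr 1
      apply List.flatMap_congr
      intro m hm
      have hmn : ¬ (m == n) = true := by
        simp; rintro rfl; exact hnr hm
      rw [List.count_filter (by simpa using hmn)]

-- B's counting fold computes occurrence counts for every 0 ≤ n ≤ 9
lemma getD_countfold (l : List Int) (d : PySem.Dict Int Int) (n : Int)
    (h0 : 0 ≤ n) (h9 : n ≤ 9) :
    (l.foldl (fun (d : PySem.Dict Int Int) v =>
        if 0 ≤ v ∧ v ≤ 9 then d.insert v (d.getD v 0 + 1) else d) d).getD n 0
      = d.getD n 0 + l.count n := by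
  induction l generalizing d with
  | nil => simp
  | cons v tl ih =>
    simp only [List.foldl_cons]
    by_cases hg : 0 ≤ v ∧ v ≤ 9
    · rw [if_pos hg, ih]
      rw [PySem.Dict.getD_insert]
      by_cases hvn : n = v
      · subst hvn
        simp [List.count_cons_self]
        ring
      · rw [if_neg hvn, List.count_cons_of_ne (by omega)]
    · rw [if_neg hg, ih, List.count_cons_of_ne (by omega)]

-- ===== VERDICT (by name: the statement is the Claim_ definition above) =====
theorem pop_stones_spec : Claim_equal_pop_stones := by
  intro stones _
  show pop_stones stones = pop_stones_alt stones
  rw [pop_stones, pop_stones_alt,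
      foldl_popInner _ (PySem.List.nodup_pyRange_one 0 10) stones []]
  simp only [List.nil_append]
  apply List.flatMap_congr
  intro n hn
  have hmem := (PySem.List.mem_pyRange_one).1 hn
  rw [getD_countfold stones PySem.Dict.empty n hmem.1 (by omega)]
  simp
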